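-- pv_equiv track=rewrite | github.com/InfographicRetrieval/intent-aware-infographic-retrieval | interface/backend/api_server.py | trim_chat_history_messages
-- ===== SOURCE A (Python) =====
-- from typing import Optional, List, Dict, Generator
--
-- def trim_chat_history_messages(messages: List[Dict], max_turns: int = 2) -> List[Dict]:
--     """
--     Trim chat history to at most `max_turns` user turns, keeping all messages from the earliest
--     retained user message to the end. This is intended for *model context only* (do not use
--     it to truncate stored history).
--
--     A "turn" here is anchored by a message with role == "user".
--     """
--     if not messages or max_turns <= 0:
--         return []
--
--     user_count = 0
--     start_idx = 0
--
--     # Walk backwards to find the earliest message index to keep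
--     for i in range(len(messages) - 1, -1, -1):
--         msg = messages[i]
--         if isinstance(msg, dict) and msg.get("role") == "user":
--             user_count += 1
--             if user_count == max_turns:
--                 start_idx = i
--                 break
--     else:
--         # Fewer than max_turns user messages -> keep all
--         start_idx = 0
--
--     return messages[start_idx:]
-- ===== SOURCE B (Python) =====
-- def trim_chat_history_messages(messages, max_turns=2):
--     if not messages or max_turns <= 0:
--         return []
--     user_indices = [i for i, m in enumerate(messages)
--                     if isinstance(m, dict) and m.get("role") == "user"]
--     start_idx = user_indices[-max_turns] if len(user_indices) >= max_turns else 0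
--     return messages[start_idx:]
-- ===== Notes on version B (the rewrite author's own statement) =====
-- stated objective: simpler
-- what changed: Replaces the backward countdown loop (with for/else break logic) by a forward comprehension collecting user-message indices and a single negative index user_indices[-max_turns] to pick the start.
import Mathlib
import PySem

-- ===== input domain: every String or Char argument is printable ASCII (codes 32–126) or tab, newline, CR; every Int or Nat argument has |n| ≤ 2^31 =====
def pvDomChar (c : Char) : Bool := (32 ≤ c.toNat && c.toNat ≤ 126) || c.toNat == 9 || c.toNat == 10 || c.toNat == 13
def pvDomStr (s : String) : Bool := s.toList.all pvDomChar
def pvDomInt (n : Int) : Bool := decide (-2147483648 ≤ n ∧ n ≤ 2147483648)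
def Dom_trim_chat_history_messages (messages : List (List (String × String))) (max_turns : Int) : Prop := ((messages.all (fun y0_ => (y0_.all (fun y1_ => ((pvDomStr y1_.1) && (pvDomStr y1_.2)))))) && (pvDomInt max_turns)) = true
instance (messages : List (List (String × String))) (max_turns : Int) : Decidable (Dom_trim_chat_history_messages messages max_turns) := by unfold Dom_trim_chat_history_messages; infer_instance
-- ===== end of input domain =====

-- B replaces A's backward countdown loop by a forward index comprehension plus a
-- single negative index pick; objective: simpler.

-- msg.get("role") == "user"  (each msg is a dict; isinstance(msg, dict) is always true under the type convention)
def pvIsUser (msg : List (String × String)) : Bool :=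
  (PySem.Dict.mk msg).get? "role" == some "user"

-- ===== PORT A =====
-- the backward `for i in range(len(messages)-1, -1, -1)` with break; returns start_idx
def pvA_loop (msgs : List (List (String × String))) (mt : Int) : Nat → Int → Int
  | i, count =>
    if pvIsUser (PySem.List.pyGetD msgs (i : Int) []) then
      if count + 1 = mt then (i : Int)
      else match i with
        | 0 => 0                               -- loop exhausted: for/else keeps start_idx = 0
        | j + 1 => pvA_loop msgs mt j (count + 1)
    else match i with
      | 0 => 0
      | j + 1 => pvA_loop msgs mt j count

def trim_chat_history_messages (messages : List (List (String × String))) (max_turns : Int) : List (List (String × String)) :=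
  if messages = [] ∨ max_turns ≤ 0 then []
  else
    let start_idx : Int := pvA_loop messages max_turns (messages.length - 1) 0
    PySem.List.slice messages (some start_idx) none

-- ===== PORT B =====
def trim_chat_history_messages_alt (messages : List (List (String × String))) (max_turns : Int) : List (List (String × String)) :=
  if messages = [] ∨ max_turns ≤ 0 then []
  else
    let user_indices : List Int :=
      (PySem.List.enumerate messages 0).filterMap
        (fun p => if pvIsUser p.2 then some p.1 else none)
    let start_idx : Int :=
      if max_turns ≤ (user_indices.length : Int) then
        PySem.List.pyGetD user_indices (-max_turns) 0   -- in range: 1 ≤ max_turns ≤ len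
      else 0
    PySem.List.slice messages (some start_idx) none

-- ===== PRECONDITION & SPEC =====
def Spec_trim_chat_history_messages (messages : List (List (String × String))) (max_turns : Int) (out : List (List (String × String))) : Prop := out = trim_chat_history_messages_alt messages max_turns
instance (messages : List (List (String × String))) (max_turns : Int) (out : List (List (String × String))) : Decidable (Spec_trim_chat_history_messages messages max_turns out) := by unfold Spec_trim_chat_history_messages; infer_instance

-- ===== CLAIM (what is proved, stated in full; the proofs are below) =====
def Claim_equal_trim_chat_history_messages : Prop := ∀ (messages : List (List (String × String))) (max_turns : Int), Dom_trim_chat_history_messages messages max_turns → Spec_trim_chat_history_messages messages max_turns (trim_chat_history_messages messages max_turns)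

-- ===== LEMMAS AND PROOFS =====

-- user indices among positions 0..i (ascending)
def pvUidx (msgs : List (List (String × String))) (i : Nat) : List Int :=
  (List.range (i + 1)).filterMap
    (fun j => if pvIsUser (msgs.getD j []) then some (j : Int) else none)

theorem pvUidx_succ (msgs : List (List (String × String))) (i : Nat) :
    pvUidx msgs (i + 1) =
      pvUidx msgs i ++ (if pvIsUser (msgs.getD (i + 1) []) then [((i : Int) + 1)] else []) := by
  unfold pvUidx
  rw [List.range_succ, List.filterMap_append]
  by_cases hu : pvIsUser (msgs[i + 1]?.getD []) <;> simp [List.getD, hu]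

theorem pvA_loop_spec (msgs : List (List (String × String))) (mt : Int) (i : Nat) :
    ∀ c : Int, 0 ≤ c → c < mt →
    pvA_loop msgs mt i c =
      (if mt ≤ ((pvUidx msgs i).length : Int) + c
       then (pvUidx msgs i).getD ((((pvUidx msgs i).length : Int) + c - mt).toNat) 0
       else 0) := by
  induction i with
  | zero =>
    intro c hc hlt
    have hU : pvUidx msgs 0 = if pvIsUser (msgs.getD 0 []) then [(0 : Int)] else [] := by
      unfold pvUidx
      by_cases hu : pvIsUser (msgs[0]?.getD []) <;> simp [List.range_one, List.getD, hu]
    unfold pvA_loop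
    rw [hU]
    by_cases hu : pvIsUser (msgs[0]?.getD [])
    · by_cases he : c + 1 = mt
      · have h0 : ((1 : Int) + c - mt).toNat = 0 := by omega
        have hcnd : mt ≤ ((1 : Int) + c) := by omega
        simp [List.getD, hu, he, h0, hcnd]
      · have hcnd : ¬ mt ≤ ((1 : Int) + c) := by omega
        simp [List.getD, hu, he, hcnd]
    · have hcnd : ¬ mt ≤ ((0 : Int) + c) := by omega
      simp [List.getD, hu, hcnd]
  | succ j ih =>
    intro c hc hlt
    rw [pvUidx_succ]
    unfold pvA_loop
    simp only [PySem.List.pyGetD_natCast]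
    by_cases hu : pvIsUser (msgs.getD (j + 1) [])
    · simp only [hu, if_pos, if_true]
      by_cases he : c + 1 = mt
      · have hlen : (pvUidx msgs j ++ [((j : Int) + 1)]).length = (pvUidx msgs j).length + 1 := by
          simp
        rw [if_pos he]
        have hcond : mt ≤ (((pvUidx msgs j ++ [((j : Int) + 1)]).length : Int) + c) := by
          rw [hlen]; push_cast; omega
        rw [if_pos hcond]
        have hidx : ((((pvUidx msgs j ++ [((j : Int) + 1)]).length : Int) + c - mt).toNat)
            = (pvUidx msgs j).length := by
          rw [hlen]; omega
        rw [hidx, List.getD_eq_getElem?_getD, List.getElem?_append_right (le_refl _)]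
        simp
      · rw [if_neg he, ih (c + 1) (by omega) (by omega)]
        have hlen : (pvUidx msgs j ++ [((j : Int) + 1)]).length = (pvUidx msgs j).length + 1 := by
          simp
        by_cases hcond : mt ≤ ((pvUidx msgs j).length : Int) + (c + 1)
        · have hcond' : mt ≤ (((pvUidx msgs j ++ [((j : Int) + 1)]).length : Int) + c) := by
            rw [hlen]; push_cast; omega
          rw [if_pos hcond, if_pos hcond']
          have hsame : ((((pvUidx msgs j ++ [((j : Int) + 1)]).length : Int) + c - mt).toNat)
              = ((((pvUidx msgs j).length : Int) + (c + 1) - mt).toNat) := by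
            rw [hlen]; push_cast; omega
          rw [hsame]
          have hidxlt : ((((pvUidx msgs j).length : Int) + (c + 1) - mt).toNat) < (pvUidx msgs j).length := by
            omega
          rw [List.getD_eq_getElem?_getD, List.getD_eq_getElem?_getD,
              List.getElem?_append_left hidxlt]
        · have hcond' : ¬ mt ≤ (((pvUidx msgs j ++ [((j : Int) + 1)]).length : Int) + c) := by
            rw [hlen]; push_cast; omega
          rw [if_neg hcond, if_neg hcond']
    · simp only [hu, if_neg, if_false, List.append_nil, Bool.false_eq_true]
      exact ih c hc hlt

-- B's comprehension equals pvUidx over the whole list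
theorem pvUidx_eq_enum (msgs : List (List (String × String))) (h : msgs ≠ []) :
    (PySem.List.enumerate msgs 0).filterMap
        (fun p => if pvIsUser p.2 then some p.1 else none)
      = pvUidx msgs (msgs.length - 1) := by
  rw [PySem.List.enumerate_eq_map_pyRange msgs ([] : List (String × String)),
      List.filterMap_map]
  unfold pvUidx
  have hlen : msgs.length - 1 + 1 = msgs.length := by
    cases msgs with
    | nil => exact absurd rfl h
    | cons a l => simp
  have hl2 : PySem.List.len msgs = ((msgs.length : Nat) : Int) := by
    simp [PySem.List.len]
  rw [hl2, hlen, PySem.List.pyRange_zero_natCast, List.filterMap_map]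
  congr 1
  funext j
  simp [Function.comp]

theorem pv_starts_eq (msgs : List (List (String × String))) (mt : Int)
    (hne : msgs ≠ []) (hmt : 0 < mt) :
    pvA_loop msgs mt (msgs.length - 1) 0 =
      (let U := (PySem.List.enumerate msgs 0).filterMap
          (fun p => if pvIsUser p.2 then some p.1 else none)
       if mt ≤ (U.length : Int) then PySem.List.pyGetD U (-mt) 0 else 0) := by
  rw [pvA_loop_spec msgs mt (msgs.length - 1) 0 (le_refl 0) hmt]
  simp only [pvUidx_eq_enum msgs hne, add_zero]
  set U := pvUidx msgs (msgs.length - 1) with hU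
  by_cases hcnd : mt ≤ (U.length : Int)
  · rw [if_pos hcnd, if_pos hcnd]
    have h1 : -mt = -((mt.toNat : Nat) : Int) := by omega
    have hk : 0 < mt.toNat := by omega
    have hk' : mt.toNat ≤ U.length := by omega
    rw [h1, PySem.List.pyGetD_neg_natCast U mt.toNat 0 hk hk']
    have h2 : ((U.length : Int) - mt).toNat = U.length - mt.toNat := by omega
    rw [h2, List.getD_eq_getElem?_getD, List.getElem?_eq_getElem (by omega)]
    simp
  · rw [if_neg hcnd, if_neg hcnd]

-- ===== VERDICT (by name: the statement is the Claim_ definition above) =====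
theorem trim_chat_history_messages_spec : Claim_equal_trim_chat_history_messages := by
  intro messages max_turns _
  unfold Spec_trim_chat_history_messages trim_chat_history_messages trim_chat_history_messages_alt
  by_cases hg : messages = [] ∨ max_turns ≤ 0
  · simp [hg]
  · rw [if_neg hg, if_neg hg]
    have h1 : messages ≠ [] := fun h => hg (Or.inl h)
    have h2 : 0 < max_turns := by
      by_contra h
      exact hg (Or.inr (by omega))
    rw [pv_starts_eq messages max_turns h1 h2]
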